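-- pv_equiv track=rewrite | github.com/jimhcyang/ChessAnalytics_recommendation_and_vision | chess_vision/attempt_2_3d_occupancy_detection/src/utils.py | occupancy_to_fen
-- ===== SOURCE A (Python) =====
-- def occupancy_to_fen(occupancy):
--     # Initialize the FEN string
--     fen = ""
--     empty_count = 0  # Counter for consecutive empty squares
--
--     # Iterate over each character in the occupancy string
--     for i, char in enumerate(occupancy):
--         if char == '0':
--             # Increment counter for empty squares
--             empty_count += 1
--         else:
--             # If there's a counted sequence of empty squares, add it before the piece
--             if empty_count > 0:
--                 fen += str(empty_count)
--                 empty_count = 0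
--             # Add a pawn for each '1', using 'P' (we assume white pawns for simplicity)
--             fen += 'P'
--
--         # At the end of a row (8 characters processed) or at the end of the string
--         if (i + 1) % 8 == 0 and i != 0:
--             if empty_count > 0:
--                 # Add remaining empty square count at the end of a row
--                 fen += str(empty_count)
--                 empty_count = 0
--             if i != len(occupancy) - 1:
--                 # Add a slash to separate rows, except at the end of the string
--                 fen += '/'
--
--     # Handle any remaining empty squares at the end (if the loop ends without resetting)
--     if empty_count > 0:
--         fen += str(empty_count)
--
--     return fen
-- ===== SOURCE B (Python) =====
-- def occupancy_to_fen(occupancy):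
--     rows = []
--     for i in range(0, len(occupancy), 8):
--         out = ""
--         count = 0
--         for ch in occupancy[i:i+8]:
--             if ch == '0':
--                 count += 1
--             else:
--                 if count > 0:
--                     out += str(count)
--                     count = 0
--                 out += 'P'
--         if count > 0:
--             out += str(count)
--         rows.append(out)
--     return '/'.join(rows)
-- ===== Notes on version B (the rewrite author's own statement) =====
-- stated objective: simpler
-- what changed: B splits the string into 8-character rows and run-length-encodes each row independently, delegating row separation to a slash-join, instead of A's single indexed loop with a modular boundary check and manual slash/flush bookkeeping.
import Mathlib
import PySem

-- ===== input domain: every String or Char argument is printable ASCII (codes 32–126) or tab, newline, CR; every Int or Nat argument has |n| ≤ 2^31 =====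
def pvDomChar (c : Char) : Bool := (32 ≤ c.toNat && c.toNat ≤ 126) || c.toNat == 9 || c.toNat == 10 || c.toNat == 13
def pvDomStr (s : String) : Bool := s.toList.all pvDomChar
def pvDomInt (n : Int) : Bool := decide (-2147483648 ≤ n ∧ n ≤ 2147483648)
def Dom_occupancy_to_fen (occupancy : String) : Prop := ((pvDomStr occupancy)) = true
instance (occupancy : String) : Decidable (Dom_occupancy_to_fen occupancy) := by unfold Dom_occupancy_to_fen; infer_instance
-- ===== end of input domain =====

-- B replaces A's single indexed loop (modular boundary check, manual slash/flush bookkeeping)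
-- by splitting into 8-char rows, run-length-encoding each row, and joining with '/': simpler decomposition, same cost.

-- ===== PORT A =====
-- one step of A's `for i, char in enumerate(occupancy)` loop; state = (fen, empty_count)
def aStep (n : Int) (st : List Char × Int) (p : Int × Char) : List Char × Int :=
  let st1 : List Char × Int :=
    if p.2 = '0' then (st.1, st.2 + 1)
    else ((if st.2 > 0 then st.1 ++ PySem.Int.toChars st.2 else st.1) ++ ['P'], 0)
  if PySem.Int.mod (p.1 + 1) 8 = 0 ∧ p.1 ≠ 0 then
    let st2 := if st1.2 > 0 then (st1.1 ++ PySem.Int.toChars st1.2, (0 : Int)) else st1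
    if p.1 ≠ n - 1 then (st2.1 ++ ['/'], st2.2) else st2
  else st1

def occupancy_to_fen (occupancy : String) : String :=
  let cs := occupancy.toList
  let st := (PySem.List.enumerate cs 0).foldl (aStep (cs.length : Int)) ([], 0)
  String.ofList (if st.2 > 0 then st.1 ++ PySem.Int.toChars st.2 else st.1)

-- ===== PORT B =====
-- one step of B's inner `for ch in row` loop; state = (out, count)
def rstep (st : List Char × Int) (ch : Char) : List Char × Int :=
  if ch = '0' then (st.1, st.2 + 1)
  else ((if st.2 > 0 then st.1 ++ PySem.Int.toChars st.2 else st.1) ++ ['P'], 0)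

-- the body of B's while loop for one row (run-length encoding with trailing flush)
def rleRow (row : List Char) : List Char :=
  let st := row.foldl rstep ([], 0)
  if st.2 > 0 then st.1 ++ PySem.Int.toChars st.2 else st.1

-- '/'.join(rows)
def joinSlash : List (List Char) → List Char
  | [] => []
  | [r] => r
  | r :: rs => r ++ '/' :: joinSlash rs

-- B's outer loop: `for i in range(0, len(occupancy), 8)`, one rleRow per slice occupancy[i:i+8]
def occupancy_to_fen_alt (occupancy : String) : String :=
  let cs := occupancy.toList
  let rows := (PySem.List.pyRange 0 (cs.length : Int) 8).map
    (fun i => rleRow (PySem.List.slice cs (some i) (some (i + 8))))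
  String.ofList (joinSlash rows)

-- ===== PRECONDITION & SPEC =====
def Spec_occupancy_to_fen (occupancy : String) (out : String) : Prop := out = occupancy_to_fen_alt occupancy
instance (occupancy : String) (out : String) : Decidable (Spec_occupancy_to_fen occupancy out) := by unfold Spec_occupancy_to_fen; infer_instance

-- ===== CLAIM (what is proved, stated in full; the proofs are below) =====
def Claim_equal_occupancy_to_fen : Prop := ∀ (occupancy : String), Dom_occupancy_to_fen occupancy → Spec_occupancy_to_fen occupancy (occupancy_to_fen occupancy)

-- ===== LEMMAS AND PROOFS =====

-- proof helper: B's row list, as structural recursion on the remaining suffix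
def chunkRows : List Char → List (List Char)
  | [] => []
  | c :: rest => rleRow ((c :: rest).take 8) :: chunkRows ((c :: rest).drop 8)
  termination_by cs => cs.length
  decreasing_by simp [List.length_drop]


-- A's end-of-row bookkeeping (flush the count, then maybe add a slash), as a function of the state
def rowEnd (n i : Int) (st : List Char × Int) : List Char × Int :=
  let st2 := if st.2 > 0 then (st.1 ++ PySem.Int.toChars st.2, (0 : Int)) else st
  if i ≠ n - 1 then (st2.1 ++ ['/'], st2.2) else st2

-- A's trailing flush
def fin (st : List Char × Int) : List Char :=
  if st.2 > 0 then st.1 ++ PySem.Int.toChars st.2 else st.1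

theorem aStep_nb (n i : Int) (h : PySem.Int.mod (i + 1) 8 ≠ 0) (st : List Char × Int) (ch : Char) :
    aStep n st (i, ch) = rstep st ch := by
  simp only [Ne, PySem.Int.mod_eq_zero_iff_dvd] at h
  simp [aStep, rstep, h]

theorem aStep_b (n i : Int) (h : PySem.Int.mod (i + 1) 8 = 0) (h0 : i ≠ 0) (st : List Char × Int) (ch : Char) :
    aStep n st (i, ch) = rowEnd n i (rstep st ch) := by
  rw [PySem.Int.mod_eq_zero_iff_dvd] at h
  simp [aStep, rstep, rowEnd, h, h0]

theorem mod8_cast (m : Nat) : PySem.Int.mod (m : Int) 8 = ((m % 8 : Nat) : Int) := by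
  rw [PySem.Int.mod_eq_emod_of_pos (by norm_num)]
  omega

theorem fold_nb (n : Int) : ∀ (row : List Char) (k : Nat) (st : List Char × Int),
    (∀ j, j < row.length → (k + j + 1) % 8 ≠ 0) →
    (PySem.List.enumerate row (k : Int)).foldl (aStep n) st = row.foldl rstep st := by
  intro row
  induction row with
  | nil => intro k st _; simp [PySem.List.enumerate_nil]
  | cons c t ih =>
    intro k st h
    rw [PySem.List.enumerate_cons, List.foldl_cons, List.foldl_cons,
      aStep_nb n (k : Int) (by
        have := h 0 (by simp)
        have : ((k : Int) + 1) = ((k + 1 : Nat) : Int) := by push_cast; ring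
        rw [this, mod8_cast]
        have := h 0 (by simp)
        omega)]
    have : ((k : Int) + 1) = ((k + 1 : Nat) : Int) := by push_cast; ring
    rw [this, ih (k + 1) _ (fun j hj => by
      have := h (j + 1) (by simpa using Nat.succ_lt_succ hj)
      omega)]

theorem fold_full (n : Int) (row : List Char) (k : Nat) (st : List Char × Int)
    (hlen : row.length = 8) (hk : k % 8 = 0) :
    (PySem.List.enumerate row (k : Int)).foldl (aStep n) st
      = rowEnd n ((k : Int) + 7) (row.foldl rstep st) := by
  rcases List.eq_nil_or_concat row with h | ⟨t, x, h⟩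
  · simp [h] at hlen
  · subst h
    rw [List.concat_eq_append] at hlen ⊢
    have ht : t.length = 7 := by simp at hlen; omega
    rw [PySem.List.enumerate_append, List.foldl_append, List.foldl_append,
      fold_nb n t k st (fun j hj => by rw [ht] at hj; omega)]
    rw [PySem.List.enumerate_cons, PySem.List.enumerate_nil]
    simp only [List.foldl_cons, List.foldl_nil, ht]
    rw [aStep_b n _ (by
        rw [PySem.Int.mod_eq_emod_of_pos (by norm_num)]
        push_cast
        omega)
      (by push_cast; omega)]
    norm_num

-- the accumulated output string is a pure prefix: foldl from (fen, c) = fen ++ foldl from ([], c)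
theorem rstep_prefix : ∀ (row : List Char) (fen : List Char) (c : Int),
    row.foldl rstep (fen, c)
      = (fen ++ (row.foldl rstep ([], c)).1, (row.foldl rstep ([], c)).2) := by
  intro row
  induction row with
  | nil => intro fen c; simp
  | cons ch t ih =>
    intro fen c
    by_cases h : ch = '0'
    · simp only [List.foldl_cons, rstep, if_pos h]
      exact ih fen (c + 1)
    · simp only [List.foldl_cons, rstep, if_neg h]
      by_cases hc : c > 0
      · simp only [if_pos hc]
        rw [ih (fen ++ PySem.Int.toChars c ++ ['P']) 0, ih (([] : List Char) ++ PySem.Int.toChars c ++ ['P']) 0]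
        simp
      · simp only [if_neg hc]
        rw [ih (fen ++ ['P']) 0, ih (([] : List Char) ++ ['P']) 0]
        simp

theorem rstep_nonneg : ∀ (row : List Char) (st : List Char × Int), 0 ≤ st.2 →
    0 ≤ (row.foldl rstep st).2 := by
  intro row
  induction row with
  | nil => intro st h; simpa
  | cons ch t ih =>
    intro st h
    rw [List.foldl_cons]
    apply ih
    by_cases hc : ch = '0'
    · simp [rstep, hc]; omega
    · simp [rstep, hc]

theorem chunkRows_ne_nil (cs : List Char) (h : cs ≠ []) : chunkRows cs ≠ [] := by
  cases cs with
  | nil => exact absurd rfl h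
  | cons c t => rw [chunkRows]; simp

theorem chunkRows_cons (cs : List Char) (h : cs ≠ []) :
    chunkRows cs = rleRow (cs.take 8) :: chunkRows (cs.drop 8) := by
  cases cs with
  | nil => exact absurd rfl h
  | cons c t => conv_lhs => rw [chunkRows]

-- main induction: A's loop over the suffix cs starting at index k (a multiple of 8),
-- followed by the trailing flush, produces fen ++ B's row encoding of cs
theorem main_lemma : ∀ (m : Nat) (cs : List Char) (k : Nat) (fen : List Char) (n : Int),
    cs.length ≤ m → cs ≠ [] → k % 8 = 0 → n = (k : Int) + cs.length →
    fin ((PySem.List.enumerate cs (k : Int)).foldl (aStep n) (fen, 0))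
      = fen ++ joinSlash (chunkRows cs) := by
  intro m
  induction m with
  | zero =>
    intro cs k fen n hm hne _ _
    rw [Nat.le_zero] at hm
    exact absurd (List.length_eq_zero_iff.mp hm) hne
  | succ m ih =>
    intro cs k fen n hm hne hk hn
    rcases Nat.lt_or_ge cs.length 9 with hsmall | hbig
    · -- single (possibly partial) row
      have hdrop : cs.drop 8 = [] := by
        rw [List.drop_eq_nil_iff]; omega
      have htake : cs.take 8 = cs := by
        rw [List.take_of_length_le]; omega
      have hfold : fin (cs.foldl rstep (fen, 0)) = fen ++ rleRow cs := by
        rw [rstep_prefix cs fen 0]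
        unfold fin rleRow
        by_cases hc : (cs.foldl rstep ([], 0)).2 > 0 <;> simp [hc]
      have hRHS : joinSlash (chunkRows cs) = rleRow cs := by
        rw [chunkRows_cons cs hne, hdrop, htake]
        simp [chunkRows, joinSlash]
      rcases Nat.lt_or_ge cs.length 8 with h8 | h8
      · rw [fold_nb n cs k (fen, 0) (fun j hj => by omega), hfold, hRHS]
      · have hlen : cs.length = 8 := by omega
        rw [fold_full n cs k (fen, 0) hlen hk]
        have hi : (k : Int) + 7 = n - 1 := by rw [hn, hlen]; push_cast; ring
        have hnn : 0 ≤ (cs.foldl rstep (fen, 0)).2 := rstep_nonneg cs (fen, 0) (by simp)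
        unfold rowEnd
        rw [hRHS, ← hfold]
        unfold fin
        by_cases hc : (cs.foldl rstep (fen, 0)).2 > 0 <;> simp [hc, hi]
    · -- a full row followed by a nonempty rest
      have htl : (cs.take 8).length = 8 := by rw [List.length_take]; omega
      have hrest : cs.drop 8 ≠ [] := by rw [← List.length_pos_iff, List.length_drop]; omega
      have hsplit : cs = cs.take 8 ++ cs.drop 8 := (List.take_append_drop 8 cs).symm
      conv_lhs => rw [hsplit]
      rw [PySem.List.enumerate_append, List.foldl_append,
        fold_full n (cs.take 8) k (fen, 0) htl hk]
      have hnn : 0 ≤ ((cs.take 8).foldl rstep (fen, 0)).2 :=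
        rstep_nonneg (cs.take 8) (fen, 0) (by simp)
      have hi : (k : Int) + 7 ≠ n - 1 := by
        rw [hn]; omega
      have hF : rowEnd n ((k : Int) + 7) ((cs.take 8).foldl rstep (fen, 0))
          = ((fen ++ rleRow (cs.take 8)) ++ ['/'], 0) := by
        unfold rowEnd
        rw [rstep_prefix (cs.take 8) fen 0]
        unfold rleRow
        by_cases hc : ((cs.take 8).foldl rstep ([], 0)).2 > 0
        · simp [hc, hi]
        · have : ((cs.take 8).foldl rstep ([], 0)).2 = 0 := by
            rw [rstep_prefix (cs.take 8) fen 0] at hnn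
            simp at hnn; omega
          simp [hi, this]
      rw [hF, htl]
      have hstart : ((k : Int) + ((8 : Nat) : Int)) = ((k + 8 : Nat) : Int) := by push_cast; ring
      rw [hstart, ih (cs.drop 8) (k + 8) ((fen ++ rleRow (cs.take 8)) ++ ['/']) n
        (by rw [List.length_drop]; omega) hrest (by omega)
        (by rw [hn, List.length_drop]; push_cast; omega)]
      rw [chunkRows_cons cs hne]
      have hjs : joinSlash (rleRow (cs.take 8) :: chunkRows (cs.drop 8))
          = rleRow (cs.take 8) ++ '/' :: joinSlash (chunkRows (cs.drop 8)) := by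
        cases h : chunkRows (cs.drop 8) with
        | nil => exact absurd h (chunkRows_ne_nil _ hrest)
        | cons a l => rfl
      rw [hjs]
      simp


theorem slice8 (cs : List Char) (k : Nat) :
    PySem.List.slice cs (some ((0 : Int) + 8 * (k : Int))) (some ((0 : Int) + 8 * (k : Int) + 8))
      = (cs.drop (8 * k)).take 8 := by
  have h1 : (0 : Int) + 8 * (k : Int) = ((8 * k : Nat) : Int) := by push_cast; ring
  rw [h1]
  rw [show ((8 * k : Nat) : Int) + (8 : Int) = ((8 * k : Nat) : Int) + ((8 : Nat) : Int) from by norm_num,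
    PySem.List.slice_natCast_add]

theorem range_chunk : ∀ (m : Nat) (cs : List Char), cs.length ≤ m →
    (List.range ((cs.length + 7) / 8)).map (fun k => rleRow ((cs.drop (8 * k)).take 8))
      = chunkRows cs := by
  intro m
  induction m with
  | zero =>
    intro cs hm
    rw [Nat.le_zero] at hm
    rw [List.length_eq_zero_iff.mp hm]
    rw [chunkRows]
    rfl
  | succ m ih =>
    intro cs hm
    cases cs with
    | nil => rw [chunkRows]; rfl
    | cons c t =>
      have hN : ((c :: t).length + 7) / 8 = ((((c :: t).drop 8).length + 7) / 8) + 1 := by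
        simp only [List.length_cons, List.length_drop]
        omega
      have htail := ih ((c :: t).drop 8)
        (by simp only [List.length_drop, List.length_cons] at hm ⊢; omega)
      rw [hN, List.range_succ_eq_map, List.map_cons, List.map_map, chunkRows]
      refine congrArg₂ List.cons (by simp) ?_
      rw [← htail]
      apply List.map_congr_left
      intro k _
      simp only [Function.comp_apply, List.drop_drop, Nat.succ_eq_add_one]
      rw [show 8 * (k + 1) = 8 + 8 * k from by ring]

theorem alt_eq_chunk (cs : List Char) :
    (PySem.List.pyRange 0 (cs.length : Int) 8).map
        (fun i => rleRow (PySem.List.slice cs (some i) (some (i + 8))))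
      = chunkRows cs := by
  rw [PySem.List.pyRange_of_pos 0 (cs.length : Int) (by norm_num), List.map_map]
  have hN : (if (0 : Int) < (cs.length : Int) then (((cs.length : Int) - 0 + 8 - 1) / 8).toNat else 0)
      = (cs.length + 7) / 8 := by
    split_ifs with h
    · omega
    · omega
  rw [hN, ← range_chunk cs.length cs le_rfl]
  apply List.map_congr_left
  intro k _
  simp only [Function.comp_apply]
  rw [slice8]

-- ===== VERDICT (by name: the statement is the Claim_ definition above) =====
theorem occupancy_to_fen_spec : Claim_equal_occupancy_to_fen := by
  intro s _
  unfold Spec_occupancy_to_fen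
  simp only [occupancy_to_fen, occupancy_to_fen_alt]
  rw [alt_eq_chunk]
  by_cases h : s.toList = []
  · rw [h]
    simp [PySem.List.enumerate_nil, chunkRows, joinSlash]
  · have hm := main_lemma s.toList.length s.toList 0 [] (s.toList.length : Int)
      le_rfl h (by simp) (by simp)
    unfold fin at hm
    simp only [Nat.cast_zero, List.nil_append] at hm
    rw [hm]
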